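-- pv_equiv track=rewrite | github.com/Sz0msz3dvagy0k/sz0msz3dh-ck | dice_range_expression/main.py | dice_range_expression
-- ===== SOURCE A (Python) =====
-- def dice_range_expression(min_val, max_val):
--   dice_types = [2, 3, 4, 6, 8, 10, 20]
--   needed_range = max_val - min_val
--
--   for d in dice_types:
--     if needed_range <= d - 1:
--       offset = min_val - 1
--       if offset > 0:
--         return f"1d{d}+{offset}"
--       elif offset < 0:
--         return f"1d{d}{offset}"
--       else:
--         return f"1d{d}"
--
--   for d1 in dice_types:
--     for d2 in dice_types:
--       range_sum = (d1 - 1) + (d2 - 1)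
--       if needed_range <= range_sum:
--         offset = min_val - 2
--         parts = [f"1d{d1}", f"1d{d2}"]
--         expr = "+".join(parts)
--         if offset > 0: return f"{expr}+{offset}"
--         elif offset < 0: return f"{expr}{offset}"
--         return expr
--
--   return "No solution"
-- ===== SOURCE B (Python) =====
-- def dice_range_expression(min_val, max_val):
--     dice_types = [2, 3, 4, 6, 8, 10, 20]
--     needed_range = max_val - min_val
--
--     def cover(r):
--         # smallest die whose range (d-1) covers r
--         return next((d for d in dice_types if d - 1 >= r), None)
--
--     def fmt(dice, offset):
--         expr = "+".join(f"1d{d}" for d in dice)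
--         if offset > 0:
--             return f"{expr}+{offset}"
--         if offset < 0:
--             return f"{expr}{offset}"
--         return expr
--
--     d = cover(needed_range)
--     if d is not None:
--         return fmt([d], min_val - 1)
--
--     # two dice: first d1 that leaves a coverable residual, then smallest d2 covering it
--     d1 = cover(needed_range - 19)
--     if d1 is not None:
--         d2 = cover(needed_range - (d1 - 1))
--         return fmt([d1, d2], min_val - 2)
--
--     return "No solution"
-- ===== Notes on version B (the rewrite author's own statement) =====
-- stated objective: simpler
-- what changed: Replaces A's first-match scan over the die list and its 7x7 nested first-match scan over die pairs with a single 'smallest covering die' lookup applied three times (to the needed range, to needed_range-19 for the first die of a pair, and to the remaining residual for the second die), plus one shared formatting helper.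
import Mathlib
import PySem

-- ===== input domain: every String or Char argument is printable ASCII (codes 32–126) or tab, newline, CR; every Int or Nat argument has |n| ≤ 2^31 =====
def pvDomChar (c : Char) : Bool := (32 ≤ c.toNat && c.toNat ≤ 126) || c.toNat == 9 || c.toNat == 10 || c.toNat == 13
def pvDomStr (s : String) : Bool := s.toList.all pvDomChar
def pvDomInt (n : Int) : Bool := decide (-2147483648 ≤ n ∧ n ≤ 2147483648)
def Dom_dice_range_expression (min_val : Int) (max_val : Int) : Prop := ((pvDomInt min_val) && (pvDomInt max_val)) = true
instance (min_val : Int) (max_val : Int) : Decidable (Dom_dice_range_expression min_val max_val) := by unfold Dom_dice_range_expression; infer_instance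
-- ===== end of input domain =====

-- B replaces A's two first-match search loops (a 7-die scan and a 49-pair nested scan)
-- by direct closed-form lookups: a single 'smallest covering die' helper applied to the
-- needed range, to the residual needed_range-19 (for the first die of a pair) and to the
-- remaining residual (for the second die); objective: simpler.

-- ===== PORT A =====
def pvDice : List Int := [2, 3, 4, 6, 8, 10, 20]

-- first loop: 'for d in dice_types: if needed_range <= d - 1: return …'
def pvLoop1 (min_val needed : Int) : List Int → Option String
  | [] => none
  | d :: rest =>
    if needed ≤ d - 1 then
      let offset := min_val - 1
      some (if offset > 0 then "1d" ++ PySem.Int.toStr d ++ "+" ++ PySem.Int.toStr offset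
            else if offset < 0 then "1d" ++ PySem.Int.toStr d ++ PySem.Int.toStr offset
            else "1d" ++ PySem.Int.toStr d)
    else pvLoop1 min_val needed rest

-- inner of the second loop: 'for d2 in dice_types: …'
def pvLoop2Inner (min_val needed d1 : Int) : List Int → Option String
  | [] => none
  | d2 :: rest =>
    let range_sum := (d1 - 1) + (d2 - 1)
    if needed ≤ range_sum then
      let offset := min_val - 2
      let expr := PySem.Str.join "+" ["1d" ++ PySem.Int.toStr d1, "1d" ++ PySem.Int.toStr d2]
      some (if offset > 0 then expr ++ "+" ++ PySem.Int.toStr offset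
            else if offset < 0 then expr ++ PySem.Int.toStr offset
            else expr)
    else pvLoop2Inner min_val needed d1 rest

-- outer of the second loop: 'for d1 in dice_types: …'
def pvLoop2 (min_val needed : Int) : List Int → Option String
  | [] => none
  | d1 :: rest =>
    match pvLoop2Inner min_val needed d1 pvDice with
    | some s => some s
    | none => pvLoop2 min_val needed rest

def dice_range_expression (min_val : Int) (max_val : Int) : String :=
  let needed := max_val - min_val
  match pvLoop1 min_val needed pvDice with
  | some s => s
  | none =>
    match pvLoop2 min_val needed pvDice with
    | some s => s
    | none => "No solution"

-- ===== PORT B =====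
-- cover(r) = next((d for d in dice_types if d - 1 >= r), None)
def pvCover (r : Int) : List Int → Option Int
  | [] => none
  | d :: rest => if d - 1 ≥ r then some d else pvCover r rest

-- fmt(dice, offset)
def pvFmt (dice : List Int) (offset : Int) : String :=
  let expr := PySem.Str.join "+" (dice.map (fun d => "1d" ++ PySem.Int.toStr d))
  if offset > 0 then expr ++ "+" ++ PySem.Int.toStr offset
  else if offset < 0 then expr ++ PySem.Int.toStr offset
  else expr

def dice_range_expression_alt (min_val : Int) (max_val : Int) : String :=
  let needed := max_val - min_val
  match pvCover needed [2, 3, 4, 6, 8, 10, 20] with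
  | some d => pvFmt [d] (min_val - 1)
  | none =>
    match pvCover (needed - 19) [2, 3, 4, 6, 8, 10, 20] with
    | some d1 =>
      match pvCover (needed - (d1 - 1)) [2, 3, 4, 6, 8, 10, 20] with
      | some d2 => pvFmt [d1, d2] (min_val - 2)
      | none => "No solution"
    | none => "No solution"

-- ===== PRECONDITION & SPEC =====
def Spec_dice_range_expression (min_val : Int) (max_val : Int) (out : String) : Prop := out = dice_range_expression_alt min_val max_val
instance (min_val : Int) (max_val : Int) (out : String) : Decidable (Spec_dice_range_expression min_val max_val out) := by unfold Spec_dice_range_expression; infer_instance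

-- ===== CLAIM (what is proved, stated in full; the proofs are below) =====
def Claim_equal_dice_range_expression : Prop := ∀ (min_val : Int) (max_val : Int), Dom_dice_range_expression min_val max_val → Spec_dice_range_expression min_val max_val (dice_range_expression min_val max_val)

-- ===== LEMMAS AND PROOFS =====

theorem join_one (x : String) : PySem.Str.join "+" [x] = x := by
  simp [PySem.Str.join, PySem.Chars.join, List.intercalate]

theorem fmt_one (d off : Int) :
    pvFmt [d] off =
      if off > 0 then "1d" ++ PySem.Int.toStr d ++ "+" ++ PySem.Int.toStr off
      else if off < 0 then "1d" ++ PySem.Int.toStr d ++ PySem.Int.toStr off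
      else "1d" ++ PySem.Int.toStr d := by
  simp only [pvFmt, List.map, join_one]

theorem loop1_eq_cover (m r : Int) (l : List Int) :
    pvLoop1 m r l = (pvCover r l).map (fun d => pvFmt [d] (m - 1)) := by
  induction l with
  | nil => rfl
  | cons d rest ih =>
    simp only [pvLoop1, pvCover, ge_iff_le]
    by_cases h : r ≤ d - 1
    · rw [if_pos h, if_pos h, Option.map_some, fmt_one]
    · rw [if_neg h, if_neg h]; exact ih

theorem inner_eq_cover (m r d1 : Int) (l : List Int) :
    pvLoop2Inner m r d1 l =
      (pvCover (r - (d1 - 1)) l).map (fun d2 => pvFmt [d1, d2] (m - 2)) := by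
  induction l with
  | nil => rfl
  | cons d2 rest ih =>
    simp only [pvLoop2Inner, pvCover, ge_iff_le]
    by_cases h : r - (d1 - 1) ≤ d2 - 1
    · rw [if_pos (by omega : r ≤ d1 - 1 + (d2 - 1)), if_pos h, Option.map_some]
      rfl
    · rw [if_neg (by omega : ¬ r ≤ d1 - 1 + (d2 - 1)), if_neg h]; exact ih

theorem cover_none_iff (x : Int) : pvCover x [2, 3, 4, 6, 8, 10, 20] = none ↔ 19 < x := by
  simp only [pvCover, ge_iff_le]
  split_ifs <;> simp <;> omega

theorem loop2_eq (m r : Int) (l : List Int) :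
    pvLoop2 m r l =
      (pvCover (r - 19) l).map (fun d1 =>
        match pvCover (r - (d1 - 1)) [2, 3, 4, 6, 8, 10, 20] with
        | some d2 => pvFmt [d1, d2] (m - 2)
        | none => "No solution") := by
  induction l with
  | nil => rfl
  | cons d1 rest ih =>
    simp only [pvLoop2, pvDice, inner_eq_cover]
    rw [show pvCover (r - 19) (d1 :: rest)
          = if r - 19 ≤ d1 - 1 then some d1 else pvCover (r - 19) rest from rfl]
    rcases hc : pvCover (r - (d1 - 1)) [2, 3, 4, 6, 8, 10, 20] with _ | d2
    · have h19 : 19 < r - (d1 - 1) := (cover_none_iff _).mp hc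
      rw [if_neg (by omega : ¬ r - 19 ≤ d1 - 1)]
      simp only [Option.map_none]
      exact ih
    · have hle : r - 19 ≤ d1 - 1 := by
        by_contra hlt
        have hn := (cover_none_iff (r - (d1 - 1))).mpr (by omega)
        simp [hn] at hc
      rw [if_pos hle]
      simp only [Option.map_some]
      rw [hc]

-- ===== VERDICT (by name: the statement is the Claim_ definition above) =====
theorem dice_range_expression_spec : Claim_equal_dice_range_expression := by
  intro m M _
  unfold Spec_dice_range_expression dice_range_expression dice_range_expression_alt
  simp only [loop1_eq_cover, loop2_eq, pvDice]
  rcases pvCover (M - m) [2, 3, 4, 6, 8, 10, 20] with _ | d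
  · simp only [Option.map_none]
    rcases pvCover (M - m - 19) [2, 3, 4, 6, 8, 10, 20] with _ | d1
    · rfl
    · simp only [Option.map_some]
  · rfl
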